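-- pv_equiv track=rewrite | github.com/blu3r4y/ccc-linz-apr2024 | ccc/contest.py | enclosed_rectangle
-- ===== SOURCE A (Python) =====
-- from typing import List, Literal
--
-- def enclosed_rectangle(path: List[Literal["W", "A", "S", "D"]]) -> tuple[int, int]:
--     x, y = 0, 0
--     min_x, min_y = 0, 0
--     max_x, max_y = 0, 0
--
--     for dir in path:
--         if dir == "W":
--             y += 1
--         elif dir == "A":
--             x -= 1
--         elif dir == "S":
--             y -= 1
--         elif dir == "D":
--             x += 1
--
--         min_x = min(min_x, x)
--         min_y = min(min_y, y)
--         max_x = max(max_x, x)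
--         max_y = max(max_y, y)
--
--     width = max_x - min_x + 1
--     height = max_y - min_y + 1
--
--     return width, height
-- ===== SOURCE B (Python) =====
-- from typing import List, Literal
--
-- def _box(path):
--     # summary (dx, dy, mnx, mxx, mny, mxy) of the walk of `path` started at the
--     # origin: net displacement plus the relative bounding box (start included)
--     if not path:
--         return (0, 0, 0, 0, 0, 0)
--     if len(path) == 1:
--         d = path[0]
--         dx = 1 if d == "D" else (-1 if d == "A" else 0)
--         dy = 1 if d == "W" else (-1 if d == "S" else 0)
--         return (dx, dy, min(0, dx), max(0, dx), min(0, dy), max(0, dy))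
--     mid = len(path) // 2
--     a = _box(path[:mid])
--     b = _box(path[mid:])
--     return (a[0] + b[0], a[1] + b[1],
--             min(a[2], a[0] + b[2]), max(a[3], a[0] + b[3]),
--             min(a[4], a[1] + b[4]), max(a[5], a[1] + b[5]))
--
-- def enclosed_rectangle(path: List[Literal["W", "A", "S", "D"]]) -> tuple[int, int]:
--     _, _, mnx, mxx, mny, mxy = _box(path)
--     return (mxx - mnx + 1, mxy - mny + 1)
-- ===== Notes on version B (the rewrite author's own statement) =====
-- stated objective: alternative
-- what changed: Replaces A's single linear scan tracking absolute min/max with a divide-and-conquer: the path is split in half recursively, each segment reduced to a summary (net displacement plus relative bounding box), and summaries merged by a monoid-style combine that shifts the right box by the left displacement.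
import Mathlib
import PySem

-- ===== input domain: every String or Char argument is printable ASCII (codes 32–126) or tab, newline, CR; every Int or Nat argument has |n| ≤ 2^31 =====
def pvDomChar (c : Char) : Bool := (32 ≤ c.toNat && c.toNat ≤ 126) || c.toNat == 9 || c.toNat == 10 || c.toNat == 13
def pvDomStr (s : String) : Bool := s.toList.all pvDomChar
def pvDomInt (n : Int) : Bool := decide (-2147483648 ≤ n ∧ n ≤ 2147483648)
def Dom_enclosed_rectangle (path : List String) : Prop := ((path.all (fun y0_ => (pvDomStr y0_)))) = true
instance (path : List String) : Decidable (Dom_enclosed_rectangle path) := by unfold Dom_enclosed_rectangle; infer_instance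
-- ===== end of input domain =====

-- B replaces A's single linear min/max scan by a divide-and-conquer over path halves,
-- merging per-segment summaries (net displacement + relative bounding box); objective: alternative.

-- ===== PORT A =====
-- state = (x, y, min_x, min_y, max_x, max_y)
def pvStepA (st : Int × Int × Int × Int × Int × Int) (dir : String) :
    Int × Int × Int × Int × Int × Int :=
  let (x, y, mnx, mny, mxx, mxy) := st
  let (x, y) :=
    if dir = "W" then (x, y + 1)
    else if dir = "A" then (x - 1, y)
    else if dir = "S" then (x, y - 1)
    else if dir = "D" then (x + 1, y)
    else (x, y)
  (x, y, min mnx x, min mny y, max mxx x, max mxy y)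

def enclosed_rectangle (path : List String) : Int × Int :=
  match path.foldl pvStepA (0, 0, 0, 0, 0, 0) with
  | (_, _, mnx, mny, mxx, mxy) => (mxx - mnx + 1, mxy - mny + 1)

-- ===== PORT B =====
-- summary = (dx, dy, mnx, mxx, mny, mxy)
def pvCombine (a b : Int × Int × Int × Int × Int × Int) :
    Int × Int × Int × Int × Int × Int :=
  (a.1 + b.1, a.2.1 + b.2.1,
    min a.2.2.1 (a.1 + b.2.2.1), max a.2.2.2.1 (a.1 + b.2.2.2.1),
    min a.2.2.2.2.1 (a.2.1 + b.2.2.2.2.1), max a.2.2.2.2.2 (a.2.1 + b.2.2.2.2.2))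

def pvBox (path : List String) : Int × Int × Int × Int × Int × Int :=
  match path with
  | [] => (0, 0, 0, 0, 0, 0)
  | [d] =>
      let dx : Int := if d = "D" then 1 else if d = "A" then -1 else 0
      let dy : Int := if d = "W" then 1 else if d = "S" then -1 else 0
      (dx, dy, min 0 dx, max 0 dx, min 0 dy, max 0 dy)
  | d1 :: d2 :: rest =>
      let full := d1 :: d2 :: rest
      let mid := full.length / 2
      pvCombine (pvBox (full.take mid)) (pvBox (full.drop mid))
termination_by path.length
decreasing_by
  · simp [List.length_take]; omega
  · simp [List.length_drop]; omega

def enclosed_rectangle_alt (path : List String) : Int × Int :=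
  match pvBox path with
  | (_, _, mnx, mxx, mny, mxy) => (mxx - mnx + 1, mxy - mny + 1)

-- ===== PRECONDITION & SPEC =====
def Spec_enclosed_rectangle (path : List String) (out : Int × Int) : Prop := out = enclosed_rectangle_alt path
instance (path : List String) (out : Int × Int) : Decidable (Spec_enclosed_rectangle path out) := by unfold Spec_enclosed_rectangle; infer_instance

-- ===== CLAIM (what is proved, stated in full; the proofs are below) =====
def Claim_equal_enclosed_rectangle : Prop := ∀ (path : List String), Dom_enclosed_rectangle path → Spec_enclosed_rectangle path (enclosed_rectangle path)

-- ===== LEMMAS AND PROOFS =====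

-- canonical per-element summary and structural (cons) recursion reference
def pvSingle (d : String) : Int × Int × Int × Int × Int × Int :=
  let dx : Int := if d = "D" then 1 else if d = "A" then -1 else 0
  let dy : Int := if d = "W" then 1 else if d = "S" then -1 else 0
  (dx, dy, min 0 dx, max 0 dx, min 0 dy, max 0 dy)

def pvCanon : List String → Int × Int × Int × Int × Int × Int
  | [] => (0, 0, 0, 0, 0, 0)
  | d :: rest => pvCombine (pvSingle d) (pvCanon rest)

-- invariant: box bounds enclose 0 and the net displacement
def pvInv (s : Int × Int × Int × Int × Int × Int) : Prop :=
  s.2.2.1 ≤ 0 ∧ s.2.2.1 ≤ s.1 ∧ 0 ≤ s.2.2.2.1 ∧ s.1 ≤ s.2.2.2.1 ∧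
  s.2.2.2.2.1 ≤ 0 ∧ s.2.2.2.2.1 ≤ s.2.1 ∧ 0 ≤ s.2.2.2.2.2 ∧ s.2.1 ≤ s.2.2.2.2.2

theorem inv_single (d : String) : pvInv (pvSingle d) := by
  unfold pvInv pvSingle
  split_ifs <;> simp

theorem inv_combine {a b : Int × Int × Int × Int × Int × Int}
    (ha : pvInv a) (hb : pvInv b) : pvInv (pvCombine a b) := by
  obtain ⟨a1, a2, a3, a4, a5, a6⟩ := a
  obtain ⟨b1, b2, b3, b4, b5, b6⟩ := b
  unfold pvInv pvCombine at *
  simp_all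

theorem inv_canon (p : List String) : pvInv (pvCanon p) := by
  induction p with
  | nil => unfold pvInv pvCanon; simp
  | cons d rest ih => exact inv_combine (inv_single d) ih

theorem combine_assoc (a b c : Int × Int × Int × Int × Int × Int) :
    pvCombine (pvCombine a b) c = pvCombine a (pvCombine b c) := by
  obtain ⟨a1, a2, a3, a4, a5, a6⟩ := a
  obtain ⟨b1, b2, b3, b4, b5, b6⟩ := b
  obtain ⟨c1, c2, c3, c4, c5, c6⟩ := c
  unfold pvCombine
  simp [Prod.ext_iff]
  omega

theorem combine_zero_left (b : Int × Int × Int × Int × Int × Int) (hb : pvInv b) :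
    pvCombine (0, 0, 0, 0, 0, 0) b = b := by
  obtain ⟨b1, b2, b3, b4, b5, b6⟩ := b
  unfold pvCombine
  unfold pvInv at hb
  simp_all

theorem combine_zero_right (a : Int × Int × Int × Int × Int × Int) (ha : pvInv a) :
    pvCombine a (0, 0, 0, 0, 0, 0) = a := by
  obtain ⟨a1, a2, a3, a4, a5, a6⟩ := a
  unfold pvCombine
  unfold pvInv at ha
  simp_all

theorem canon_append (a b : List String) :
    pvCanon (a ++ b) = pvCombine (pvCanon a) (pvCanon b) := by
  induction a with
  | nil => simp [pvCanon, combine_zero_left _ (inv_canon b)]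
  | cons d rest ih => simp [pvCanon, ih, combine_assoc]

-- B's divide-and-conquer computes the canonical summary
theorem box_eq_canon (path : List String) : pvBox path = pvCanon path := by
  induction path using pvBox.induct with
  | case1 => rw [pvBox]; rfl
  | case2 d =>
      rw [pvBox]
      show pvSingle d = pvCanon [d]
      rw [show pvCanon [d] = pvCombine (pvSingle d) (0, 0, 0, 0, 0, 0) from rfl,
        combine_zero_right _ (inv_single d)]
  | case3 d1 d2 rest full mid ih1 ih2 =>
      rw [pvBox]
      show pvCombine (pvBox ((d1 :: d2 :: rest).take ((d1 :: d2 :: rest).length / 2)))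
          (pvBox ((d1 :: d2 :: rest).drop ((d1 :: d2 :: rest).length / 2))) = _
      rw [ih1, ih2, ← canon_append, List.take_append_drop]

-- A's branch chain performs exactly the canonical single step
theorem stepA_eq (x y mnx mny mxx mxy : Int) (d : String) :
    pvStepA (x, y, mnx, mny, mxx, mxy) d =
      (x + (pvSingle d).1, y + (pvSingle d).2.1,
        min mnx (x + (pvSingle d).1), min mny (y + (pvSingle d).2.1),
        max mxx (x + (pvSingle d).1), max mxy (y + (pvSingle d).2.1)) := by
  unfold pvStepA pvSingle
  by_cases h1 : d = "W" <;> by_cases h2 : d = "A" <;> by_cases h3 : d = "S" <;>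
    by_cases h4 : d = "D" <;> simp_all [Prod.ext_iff] <;> omega

-- the single-step summary's bounds are exactly min/max of 0 and its displacement
theorem single_shape (d : String) :
    pvSingle d = ((pvSingle d).1, (pvSingle d).2.1,
      min 0 (pvSingle d).1, max 0 (pvSingle d).1,
      min 0 (pvSingle d).2.1, max 0 (pvSingle d).2.1) := rfl

-- A's fold in terms of the canonical summary (absolute bounds from relative ones)
theorem foldA_eq (path : List String) : ∀ (x y mnx mny mxx mxy : Int),
    mnx ≤ x → x ≤ mxx → mny ≤ y → y ≤ mxy →
    path.foldl pvStepA (x, y, mnx, mny, mxx, mxy) =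
      (x + (pvCanon path).1, y + (pvCanon path).2.1,
        min mnx (x + (pvCanon path).2.2.1), min mny (y + (pvCanon path).2.2.2.2.1),
        max mxx (x + (pvCanon path).2.2.2.1), max mxy (y + (pvCanon path).2.2.2.2.2)) := by
  induction path with
  | nil =>
      intro x y mnx mny mxx mxy h1 h2 h3 h4
      unfold pvCanon
      simp [Prod.ext_iff]
      omega
  | cons d rest ih =>
      intro x y mnx mny mxx mxy h1 h2 h3 h4
      have hc := inv_canon rest
      rw [List.foldl_cons, stepA_eq, ih _ _ _ _ _ _ (by omega) (by omega) (by omega) (by omega)]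
      simp only [pvCanon]
      rcases hC : pvCanon rest with ⟨c1, c2, c3, c4, c5, c6⟩
      rw [hC] at hc
      unfold pvInv at hc
      simp at hc
      rw [single_shape d]
      unfold pvCombine
      simp [Prod.ext_iff]
      omega

-- ===== VERDICT (by name: the statement is the Claim_ definition above) =====
theorem enclosed_rectangle_spec : Claim_equal_enclosed_rectangle := by
  intro path _
  unfold Spec_enclosed_rectangle enclosed_rectangle enclosed_rectangle_alt
  have hc := inv_canon path
  rw [foldA_eq path 0 0 0 0 0 0 le_rfl le_rfl le_rfl le_rfl, box_eq_canon]
  rcases hC : pvCanon path with ⟨c1, c2, c3, c4, c5, c6⟩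
  rw [hC] at hc
  unfold pvInv at hc
  simp_all [Prod.ext_iff]
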